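-- pv_equiv track=rewrite | github.com/heimgewebe/weltgewebe | scripts/docmeta/generate_relates_to_audit.py | collect_negative_examples
-- ===== SOURCE A (Python) =====
-- MAX_NEGATIVE_EXAMPLES = 3
--
-- def collect_negative_examples(edges, doc_counts, max_examples=MAX_NEGATIVE_EXAMPLES):
--     """
--     Collect concrete relates_to relation lists from docs with high relates_to usage.
--
--     Selects docs with the most relates_to relations to show as concrete examples.
--
--     Returns:
--         list of (doc, [(target, rel_type), ...]) tuples, max_examples entries
--     """
--     # Find docs with the most relates_to, preferring docs that are 100% relates_to
--     candidates = []
--     for doc, counts in doc_counts.items():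
--         rt = counts["relates_to"]
--         if rt >= 2:
--             candidates.append((doc, rt, counts["total"]))
--     candidates.sort(key=lambda x: (-x[1], x[0]))
--
--     # Collect relation details for top candidates
--     examples = []
--     for doc, _, _ in candidates[:max_examples]:
--         rels = []
--         for source, rel_type, target in edges:
--             if source == doc:
--                 rels.append((target, rel_type))
--         rels.sort()
--         if rels:
--             examples.append((doc, rels))
--
--     return examples
-- ===== SOURCE B (Python) =====
-- MAX_NEGATIVE_EXAMPLES = 3
--
-- def collect_negative_examples(edges, doc_counts, max_examples=MAX_NEGATIVE_EXAMPLES):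
--     # One pass over edges builds an index source -> [(target, rel_type), ...] in edge
--     # order; candidates and output are produced by comprehensions over that index
--     # instead of accumulator loops rescanning edges per candidate.
--     by_source = {}
--     for source, rel_type, target in edges:
--         by_source.setdefault(source, []).append((target, rel_type))
--     candidates = sorted(
--         ((doc, c["relates_to"], c["total"])
--          for doc, c in doc_counts.items() if c["relates_to"] >= 2),
--         key=lambda x: (-x[1], x[0]))
--     picked = [(doc, sorted(by_source.get(doc, [])))
--               for doc, _, _ in candidates[:max_examples]]
--     return [(doc, rels) for doc, rels in picked if rels]
-- ===== Notes on version B (the rewrite author's own statement) =====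
-- stated objective: faster
-- what changed: B builds a source->relations index in one pass over edges and produces candidates and output via sorted-comprehension / filter pipelines instead of A's accumulator loops with a per-candidate rescan of all edges.
import Mathlib
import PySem

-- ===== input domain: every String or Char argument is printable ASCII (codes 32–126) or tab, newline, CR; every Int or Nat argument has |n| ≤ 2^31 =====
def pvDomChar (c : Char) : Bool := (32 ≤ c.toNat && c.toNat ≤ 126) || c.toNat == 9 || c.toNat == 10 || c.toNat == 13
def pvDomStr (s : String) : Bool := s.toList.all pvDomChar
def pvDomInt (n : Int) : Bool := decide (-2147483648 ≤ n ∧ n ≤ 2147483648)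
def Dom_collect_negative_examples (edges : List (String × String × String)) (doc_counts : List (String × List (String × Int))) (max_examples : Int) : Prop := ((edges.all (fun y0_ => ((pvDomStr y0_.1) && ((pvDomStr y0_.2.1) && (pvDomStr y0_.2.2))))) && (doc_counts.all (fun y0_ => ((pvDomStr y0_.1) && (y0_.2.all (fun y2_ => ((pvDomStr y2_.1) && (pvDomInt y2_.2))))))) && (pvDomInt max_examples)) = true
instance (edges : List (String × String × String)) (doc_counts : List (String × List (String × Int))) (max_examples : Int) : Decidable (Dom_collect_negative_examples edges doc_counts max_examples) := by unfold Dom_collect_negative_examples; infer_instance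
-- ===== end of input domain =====

-- B builds a source→relations index in one pass over edges and produces candidates and
-- output via sorted/filter pipelines instead of A's accumulator loops with a per-candidate
-- rescan of edges (objective: faster). Return-value equivalence only; neither mutates input.

-- ===== PORT A =====
def collect_negative_examples (edges : List (String × String × String)) (doc_counts : List (String × List (String × Int))) (max_examples : Int) : List (String × (List (String × String))) :=
  -- candidates: docs with counts["relates_to"] >= 2 (lookup via getD; Pre_ guarantees the keys)
  let candidates : List (String × Int × Int) :=
    doc_counts.foldl (fun cand p =>
      let rt := ((PySem.Dict.mk p.2).get? "relates_to").getD 0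
      if 2 ≤ rt then cand ++ [(p.1, rt, ((PySem.Dict.mk p.2).get? "total").getD 0)] else cand) []
  let candidates := PySem.List.sorted2 candidates (fun x => -x.2.1) (fun x => x.1)
  (PySem.List.slice candidates none (some max_examples)).foldl (fun ex c =>
    let rels := edges.foldl (fun rs e =>
      if e.1 == c.1 then rs ++ [(e.2.2, e.2.1)] else rs) []
    let rels := PySem.List.sorted2 rels (fun r => r.1) (fun r => r.2)
    if rels ≠ [] then ex ++ [(c.1, rels)] else ex) []

-- ===== PORT B =====
def collect_negative_examples_alt (edges : List (String × String × String)) (doc_counts : List (String × List (String × Int))) (max_examples : Int) : List (String × (List (String × String))) :=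
  -- by_source.setdefault(source, []).append((target, rel_type))
  let by_source : PySem.Dict String (List (String × String)) :=
    edges.foldl (fun d e => d.modify e.1 [] (· ++ [(e.2.2, e.2.1)])) PySem.Dict.empty
  -- candidates = sorted(generator-comprehension, key=(-rt, doc))
  let candidates : List (String × Int × Int) :=
    PySem.List.sorted2
      (doc_counts.filterMap (fun p =>
        if 2 ≤ ((PySem.Dict.mk p.2).get? "relates_to").getD 0 then
          some (p.1, ((PySem.Dict.mk p.2).get? "relates_to").getD 0,
                ((PySem.Dict.mk p.2).get? "total").getD 0)
        else none))
      (fun x => -x.2.1) (fun x => x.1)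
  -- picked = [(doc, sorted(by_source.get(doc, []))) for doc, _, _ in candidates[:max_examples]]
  let picked : List (String × List (String × String)) :=
    (PySem.List.slice candidates none (some max_examples)).map
      (fun c => (c.1, PySem.List.sorted2 (by_source.getD c.1 []) (fun r => r.1) (fun r => r.2)))
  -- return [(doc, rels) for doc, rels in picked if rels]
  picked.filterMap (fun pr => if pr.2 ≠ [] then some pr else none)

-- ===== PRECONDITION & SPEC =====
-- Pre_ excludes inputs where A raises KeyError ("relates_to" missing, or "total" missing on a
-- doc whose relates_to count is >= 2) and association lists with duplicate keys, which cannot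
-- arise from a Python dict (its serialisation would collapse them).
def Pre_collect_negative_examples (edges : List (String × String × String)) (doc_counts : List (String × List (String × Int))) (max_examples : Int) : Prop :=
  (doc_counts.map Prod.fst).Nodup ∧
  ∀ p ∈ doc_counts, (p.2.map Prod.fst).Nodup ∧
    "relates_to" ∈ p.2.map Prod.fst ∧
    (2 ≤ ((PySem.Dict.mk p.2).get? "relates_to").getD 0 → "total" ∈ p.2.map Prod.fst)
instance (edges : List (String × String × String)) (doc_counts : List (String × List (String × Int))) (max_examples : Int) : Decidable (Pre_collect_negative_examples edges doc_counts max_examples) := by unfold Pre_collect_negative_examples; infer_instance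
def pvWitness_collect_negative_examples : (List (String × String × String)) × (List (String × List (String × Int))) × Int :=
  ([("d", "relates_to", "t")], [("d", [("relates_to", 2), ("total", 2)])], 3)
def Spec_collect_negative_examples (edges : List (String × String × String)) (doc_counts : List (String × List (String × Int))) (max_examples : Int) (out : List (String × (List (String × String)))) : Prop := out = collect_negative_examples_alt edges doc_counts max_examples
instance (edges : List (String × String × String)) (doc_counts : List (String × List (String × Int))) (max_examples : Int) (out : List (String × (List (String × String)))) : Decidable (Spec_collect_negative_examples edges doc_counts max_examples out) := by unfold Spec_collect_negative_examples; infer_instance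

-- ===== CLAIM (what is proved, stated in full; the proofs are below) =====
def Claim_equal_collect_negative_examples : Prop := ∀ (edges : List (String × String × String)) (doc_counts : List (String × List (String × Int))) (max_examples : Int), Dom_collect_negative_examples edges doc_counts max_examples → Pre_collect_negative_examples edges doc_counts max_examples → Spec_collect_negative_examples edges doc_counts max_examples (collect_negative_examples edges doc_counts max_examples)

-- ===== LEMMAS AND PROOFS =====

-- a '[f x for x in xs if p x]' pipeline equals the accumulate-if loop's filter/map form
theorem filterMap_if_eq_filter_map {α β : Type} (p : α → Prop) [DecidablePred p]
    (f : α → β) (xs : List α) :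
    xs.filterMap (fun x => if p x then some (f x) else none)
      = (xs.filter (fun x => decide (p x))).map f := by
  induction xs with
  | nil => rfl
  | cons a l ih => by_cases h : p a <;> simp [h, ih]

-- B's grouped index, looked up at any doc, yields exactly A's filtered rescan of edges.
theorem by_source_getD_eq (edges : List (String × String × String)) (doc : String) :
    (edges.foldl (fun d e => d.modify e.1 [] (· ++ [(e.2.2, e.2.1)]))
      (PySem.Dict.empty : PySem.Dict String (List (String × String)))).getD doc []
    = edges.foldl (fun rs e => if e.1 == doc then rs ++ [(e.2.2, e.2.1)] else rs) [] := by
  have h1 : (edges.foldl (fun d e => d.modify e.1 [] (· ++ [(e.2.2, e.2.1)]))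
      (PySem.Dict.empty : PySem.Dict String (List (String × String))))
      = (edges.map (fun e => (e.1, (e.2.2, e.2.1)))).foldl
          (fun d p => d.modify p.1 [] (· ++ [p.2])) PySem.Dict.empty := by
    rw [List.foldl_map]
  rw [h1, PySem.Dict.getD_foldl_modify_append, PySem.List.foldl_append_if
        (p := fun e : String × String × String => e.1 == doc) (f := fun e => (e.2.2, e.2.1))]
  rw [List.filter_map, List.map_map]; simp [Function.comp_def]

theorem collect_negative_examples_spec : Claim_equal_collect_negative_examples := by
  intro edges doc_counts max_examples _ _
  unfold Spec_collect_negative_examples collect_negative_examples collect_negative_examples_alt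
  simp only [List.filterMap_map, Function.comp_def, by_source_getD_eq,
    PySem.List.foldl_append_ite, filterMap_if_eq_filter_map, List.nil_append]
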